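-- pv_equiv track=rewrite | github.com/PlusLabNLP/AESOP | extract_sentence.py | deal_non_sep
-- ===== SOURCE A (Python) =====
-- def deal_non_sep(string, keyword):
--     if keyword in string: raise Exception("it has <sep>")
--     else:
--         if "ROOT" not in string:
--             # did not try to generate the syntactic parse at all
--             final_str = string
--         else:
--             last_para_count = 0
--             # find the last element with "(" in it
--             for i in range(0, len(string.split(" "))):
--                 item = string.split(" ")[i]
--                 if "(" in item or ")" in item:
--                     last_para_count = i
--             valid_tokens = string.split(" ")[last_para_count + 1:]
--             final_str = " ".join(token for token in valid_tokens)
--         if final_str == "":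
--             final_str = "."
--         return final_str
-- ===== SOURCE B (Python) =====
-- def deal_non_sep(string, keyword):
--     if keyword in string:
--         raise Exception("it has <sep>")
--     if "ROOT" not in string:
--         final_str = string
--     else:
--         p = max(string.rfind('('), string.rfind(')'))
--         sp = string.find(' ', p + 1)
--         final_str = '' if sp == -1 else string[sp + 1:]
--     return final_str if final_str else "."
-- ===== Notes on version B (the rewrite author's own statement) =====
-- stated objective: faster
-- what changed: A re-splits the string into a token list on every loop iteration, scans the tokens for the last parenthesized one and re-joins a slice; B never tokenizes: it takes max(rfind('('), rfind(')')), finds the next space after it, and returns the raw-string suffix.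
import Mathlib
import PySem

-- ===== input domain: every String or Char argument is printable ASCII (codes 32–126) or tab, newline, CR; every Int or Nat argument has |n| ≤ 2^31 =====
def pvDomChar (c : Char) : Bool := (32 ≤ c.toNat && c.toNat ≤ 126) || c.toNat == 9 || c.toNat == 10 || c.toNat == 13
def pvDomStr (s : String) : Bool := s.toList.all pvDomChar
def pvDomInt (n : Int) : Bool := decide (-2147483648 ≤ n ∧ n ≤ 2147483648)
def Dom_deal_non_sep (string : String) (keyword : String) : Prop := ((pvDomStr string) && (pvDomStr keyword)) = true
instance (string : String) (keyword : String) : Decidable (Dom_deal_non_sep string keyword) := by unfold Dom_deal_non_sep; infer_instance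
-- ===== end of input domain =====

-- B replaces A's quadratic tokenize-scan-join (A re-splits the string on every loop
-- iteration) with raw-string index arithmetic: last paren char, next space, suffix.

-- ===== PORT A =====
def deal_non_sep (string : String) (keyword : String) : String :=
  if PySem.Str.isIn keyword string then
    ""  -- Python: raise Exception("it has <sep>") — excluded by Pre_deal_non_sep
  else
    let final_str :=
      if PySem.Str.isIn "ROOT" string = false then
        string
      else
        let toks := (PySem.Str.split? string " ").getD []   -- string.split(" "); sep ≠ "" so split? is some
        let last_para_count :=
          (PySem.List.pyRange 0 (toks.length : Int)).foldl
            (fun last i =>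
              let item := PySem.List.pyGetD toks i ""       -- string.split(" ")[i], i always in range
              if PySem.Str.isIn "(" item || PySem.Str.isIn ")" item then i else last)
            0
        let valid_tokens := PySem.List.slice toks (some (last_para_count + 1)) none
        PySem.Str.join " " valid_tokens
    if final_str == "" then "." else final_str

-- ===== PORT B =====
def deal_non_sep_alt (string : String) (keyword : String) : String :=
  if PySem.Str.isIn keyword string then
    ""  -- Python: raise Exception("it has <sep>") — excluded by Pre_deal_non_sep
  else
    let final_str :=
      if PySem.Str.isIn "ROOT" string = false then
        string
      else
        let p := max (PySem.Str.rfind string "(") (PySem.Str.rfind string ")")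
        let sp := PySem.Str.findFrom string " " (p + 1)
        if sp == -1 then "" else PySem.Str.slice string (some (sp + 1)) none
    if final_str == "" then "." else final_str

-- ===== PRECONDITION & SPEC =====
-- Pre_ excludes exactly the inputs on which A raises Exception("it has <sep>"): keyword a substring of string.
def Pre_deal_non_sep (string : String) (keyword : String) : Prop :=
  PySem.Str.isIn keyword string = false
instance (string : String) (keyword : String) : Decidable (Pre_deal_non_sep string keyword) := by
  unfold Pre_deal_non_sep; infer_instance

def pvWitness_deal_non_sep : String × String := ("(ROOT (S (NP a)) tree) done", "<sep>")

def Spec_deal_non_sep (string : String) (keyword : String) (out : String) : Prop := out = deal_non_sep_alt string keyword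
instance (string : String) (keyword : String) (out : String) : Decidable (Spec_deal_non_sep string keyword out) := by unfold Spec_deal_non_sep; infer_instance

-- ===== CLAIM (what is proved, stated in full; the proofs are below) =====
def Claim_equal_deal_non_sep : Prop := ∀ (string : String) (keyword : String), Dom_deal_non_sep string keyword → Pre_deal_non_sep string keyword → Spec_deal_non_sep string keyword (deal_non_sep string keyword)

-- ===== LEMMAS AND PROOFS =====

def sosAux : List Char → List Char → List (List Char)
  | [], cur => [cur.reverse]
  | c :: rest, cur => if c = ' ' then cur.reverse :: sosAux rest [] else sosAux rest (c :: cur)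

theorem ips_cons (c x : Char) (t : List Char) : [c].isPrefixOf (x :: t) = (c == x) := by
  simp [List.isPrefixOf]

theorem go_eq_sos (fuel : Nat) (l cur : List Char) (acc : List (List Char)) (h : l.length ≤ fuel) :
    PySem.Chars.splitOn.go [' '] fuel l cur acc = acc.reverse ++ sosAux l cur := by
  induction fuel generalizing l cur acc with
  | zero =>
    have : l = [] := by cases l <;> simp_all
    subst this
    simp [PySem.Chars.splitOn.go, sosAux]
  | succ n ih =>
    cases l with
    | nil => simp [PySem.Chars.splitOn.go, sosAux]
    | cons c rest =>
      rw [PySem.Chars.splitOn.go]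
      by_cases hc : c = ' '
      · subst hc
        have hbeq : (' ' == ' ') = true := by decide
        simp only [ips_cons, hbeq, if_pos, List.length_cons, List.length_nil, List.drop_succ_cons, List.drop_zero]
        rw [ih rest [] (cur.reverse :: acc) (by simpa using Nat.lt_succ_iff.mp (by simpa using h))]
        simp [sosAux]
      · have hbeq : (' ' == c) = false := by simp [BEq.beq]; exact fun h' => hc h'.symm
        simp only [ips_cons, hbeq, if_neg, Bool.false_eq_true, not_false_iff]
        rw [ih rest (c :: cur) acc (by simpa using Nat.lt_succ_iff.mp (by simpa using h))]
        simp [sosAux, hc]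

theorem splitOn_space (s : List Char) : PySem.Chars.splitOn s [' '] = sosAux s [] := by
  unfold PySem.Chars.splitOn
  rw [go_eq_sos _ _ _ _ (by omega)]
  simp

def fsp : List Char → Int
  | [] => -1
  | c :: r => if c = ' ' then 0 else if fsp r = -1 then -1 else 1 + fsp r

def lci (c : Char) : List Char → Int
  | [] => -1
  | x :: r => if 0 ≤ lci c r then 1 + lci c r else if x = c then 0 else -1

theorem fsp_bounds (l : List Char) : -1 ≤ fsp l ∧ fsp l < l.length := by
  induction l with
  | nil => simp [fsp]
  | cons c r ih => simp only [fsp, List.length_cons]; split_ifs <;> omega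

theorem lci_bounds (c : Char) (l : List Char) : -1 ≤ lci c l ∧ lci c l < l.length := by
  induction l with
  | nil => simp [lci]
  | cons x r ih => simp only [lci, List.length_cons]; split_ifs <;> omega

theorem lci_eq_neg_one (c : Char) (l : List Char) : lci c l = -1 ↔ c ∉ l := by
  induction l with
  | nil => simp [lci]
  | cons x r ih =>
    have hb := lci_bounds c r
    by_cases hmem : c ∈ r
    · have h0 : ¬ lci c r = -1 := fun h => (ih.mp h) hmem
      simp only [lci, if_pos (by omega : (0:Int) ≤ lci c r)]
      simp only [List.mem_cons]
      constructor
      · intro h; omega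
      · intro h; exact absurd (Or.inr hmem) h
    · have h1 : lci c r = -1 := ih.mpr hmem
      simp only [lci, h1, List.mem_cons]
      norm_num
      by_cases hx : x = c
      · subst hx
        simp
      · have hcx : ¬ c = x := fun h => hx h.symm
        simp [hx, hcx, hmem]

theorem fsp_no_space (l : List Char) (h : ' ' ∉ l) : fsp l = -1 := by
  induction l with
  | nil => rfl
  | cons c r ih =>
    simp only [List.mem_cons, not_or] at h
    have hc : ¬ c = ' ' := fun hh => h.1 hh.symm
    simp [fsp, hc, ih h.2]

theorem fsp_append_space (u r : List Char) (h : ' ' ∉ u) : fsp (u ++ ' ' :: r) = u.length := by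
  induction u with
  | nil => simp [fsp]
  | cons x t ih =>
    simp only [List.mem_cons, not_or] at h
    simp only [List.cons_append, fsp, ih h.2, List.length_cons]
    have hx : ¬ x = ' ' := fun hh => h.1 hh.symm
    have ht := fsp_bounds t
    split_ifs <;> omega

theorem find_go_space (l : List Char) (k : Nat) :
    PySem.Chars.find.go [' '] l k = if fsp l = -1 then -1 else k + fsp l := by
  induction l generalizing k with
  | nil => simp [PySem.Chars.find.go, fsp]
  | cons c t ih =>
    rw [PySem.Chars.find.go]
    by_cases hc : c = ' '
    · subst hc
      have hbeq : (' ' == ' ') = true := by decide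
      simp [fsp]
    · have hbeq : (' ' == c) = false := by simp [BEq.beq]; exact fun h' => hc h'.symm
      have ht := fsp_bounds t
      simp only [ips_cons, hbeq, Bool.false_eq_true, if_neg, not_false_iff, ih, fsp, hc]
      split_ifs <;> omega

theorem find_space (l : List Char) : PySem.Chars.find l [' '] = fsp l := by
  unfold PySem.Chars.find
  rw [find_go_space]
  have := fsp_bounds l
  split_ifs <;> omega

theorem lci_append_singleton (c a : Char) (l : List Char) :
    lci c (l ++ [a]) = if a = c then (l.length : Int) else lci c l := by
  induction l with
  | nil => by_cases h : a = c <;> simp [lci, h]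
  | cons x t ih =>
    have hb := lci_bounds c t
    have hb2 := lci_bounds c (t ++ [a])
    by_cases h : a = c
    · simp only [List.cons_append, lci, ih, if_pos h, List.length_cons]
      rw [if_pos (by positivity)]
      push_cast; ring
    · simp only [List.cons_append, lci, ih, if_neg h]

theorem rfind_go_singleton (s : List Char) (c : Char) (j : Nat) :
    PySem.Chars.rfind.go s [c] j = lci c (s.take (j + 1)) := by
  induction j with
  | zero =>
    rw [PySem.Chars.rfind.go]
    cases s with
    | nil => simp [lci]
    | cons x t =>
      simp only [ips_cons, List.take_succ_cons, List.take_zero]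
      by_cases h : c = x
      · subst h; simp [lci]
      · have : (c == x) = false := by simp [h]
        have hx : ¬ x = c := fun hh => h hh.symm
        simp [this, lci, hx]
  | succ j ih =>
    rw [PySem.Chars.rfind.go]
    by_cases hlt : j + 1 < s.length
    · have hdrop : s.drop (j+1) = s[j+1] :: s.drop (j+2) := List.drop_eq_getElem_cons hlt
      have htake : s.take (j+2) = s.take (j+1) ++ [s[j+1]] := by
        rw [List.take_add_one, List.getElem?_eq_getElem hlt]; rfl
      rw [htake, lci_append_singleton]
      have hlen : (s.take (j+1)).length = j + 1 := by simp; omega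
      by_cases h : s[j+1] = c
      · have : (c == s[j+1]) = true := by simp [h]
        simp [hdrop, h, hlen]
      · have hcx : ¬ c = s[j+1] := fun hh => h hh.symm
        have hpc : [c].isPrefixOf (s[j+1] :: s.drop (j+2)) = false := by
          rw [ips_cons]; simp [hcx]
        rw [hdrop]
        simp only [hpc, Bool.false_eq_true, if_false]
        rw [ih, if_neg h]
    · have hdrop : s.drop (j+1) = [] := List.drop_eq_nil_of_le (by omega)
      have htake1 : s.take (j+1) = s := List.take_of_length_le (by omega)
      have htake2 : s.take (j+2) = s := List.take_of_length_le (by omega)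
      have : [c].isPrefixOf (s.drop (j+1)) = false := by rw [hdrop]; rfl
      simp [this, ih, htake1, htake2]

theorem rfind_singleton (s : List Char) (c : Char) : PySem.Chars.rfind s [c] = lci c s := by
  unfold PySem.Chars.rfind
  rw [rfind_go_singleton, List.take_of_length_le (by omega)]

theorem lci_append (c : Char) (u v : List Char) :
    lci c (u ++ v) = if 0 ≤ lci c v then (u.length : Int) + lci c v else lci c u := by
  induction u with
  | nil =>
    have hb := lci_bounds c v
    by_cases h : 0 ≤ lci c v
    · simp [h]
    · simp [lci, h]; omega
  | cons x t ih =>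
    have hbv := lci_bounds c v
    have hbt := lci_bounds c t
    by_cases h : 0 ≤ lci c v
    · simp only [List.cons_append, lci, ih, if_pos h, List.length_cons]
      rw [if_pos (by positivity)]
      push_cast; ring
    · simp only [List.cons_append, lci, ih, if_neg h]

theorem singleton_infix (c : Char) (l : List Char) : [c] <:+: l ↔ c ∈ l := by
  constructor
  · intro h; exact (List.singleton_sublist).mp h.sublist
  · intro h
    obtain ⟨u, v, rfl⟩ := List.append_of_mem h
    exact ⟨u, v, by simp⟩

theorem isIn_singleton (c : Char) (l : List Char) : PySem.Chars.isIn [c] l = true ↔ c ∈ l := by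
  rw [PySem.Chars.isIn_iff_infix, singleton_infix]

def hasP (t : List Char) : Bool := PySem.Chars.isIn ['('] t || PySem.Chars.isIn [')'] t

theorem hasP_iff (t : List Char) : hasP t = true ↔ ('(' ∈ t ∨ ')' ∈ t) := by
  simp [hasP, isIn_singleton]

theorem sosAux_ne_nil (l cur : List Char) : sosAux l cur ≠ [] := by
  induction l generalizing cur with
  | nil => simp [sosAux]
  | cons c rest ih =>
    simp only [sosAux]
    split_ifs <;> simp_all

theorem join_sos (l cur : List Char) :
    PySem.Chars.join [' '] (sosAux l cur) = cur.reverse ++ l := by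
  induction l generalizing cur with
  | nil => simp [sosAux, PySem.Chars.join_singleton]
  | cons c rest ih =>
    simp only [sosAux]
    by_cases hc : c = ' '
    · subst hc
      rw [if_pos rfl]
      obtain ⟨h, t, hht⟩ : ∃ h t, sosAux rest [] = h :: t := by
        cases hh : sosAux rest [] with
        | nil => exact absurd hh (sosAux_ne_nil rest [])
        | cons h t => exact ⟨h, t, rfl⟩
      rw [hht, PySem.Chars.join_cons_cons, ← hht, ih]
      simp
    · rw [if_neg hc, ih]
      simp

theorem mem_sosAux (c : Char) (hc : c ≠ ' ') (l cur : List Char) (h : c ∈ cur ∨ c ∈ l) :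
    ∃ t ∈ sosAux l cur, c ∈ t := by
  induction l generalizing cur with
  | nil =>
    refine ⟨cur.reverse, by simp [sosAux], ?_⟩
    rcases h with h | h
    · simpa using h
    · simp at h
  | cons x rest ih =>
    simp only [sosAux]
    by_cases hx : x = ' '
    · subst hx
      rw [if_pos rfl]
      rcases h with h | h
      · exact ⟨cur.reverse, by simp, by simpa using h⟩
      · have : c ∈ rest := by
          rcases List.mem_cons.mp h with h1 | h1
          · exact absurd h1 hc
          · exact h1
        obtain ⟨t, ht, hct⟩ := ih [] (Or.inr this)
        exact ⟨t, List.mem_cons_of_mem _ ht, hct⟩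
    · rw [if_neg hx]
      rcases h with h | h
      · exact ih (x :: cur) (Or.inl (List.mem_cons_of_mem _ h))
      · rcases List.mem_cons.mp h with h1 | h1
        · exact ih (x :: cur) (Or.inl (by simp [h1]))
        · exact ih (x :: cur) (Or.inr h1)

theorem mem_of_mem_sosAux (c : Char) (l cur : List Char) (t : List Char)
    (ht : t ∈ sosAux l cur) (hct : c ∈ t) : c ∈ cur ∨ c ∈ l := by
  induction l generalizing cur with
  | nil =>
    simp only [sosAux, List.mem_singleton] at ht
    subst ht
    exact Or.inl (by simpa using hct)
  | cons x rest ih =>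
    simp only [sosAux] at ht
    by_cases hx : x = ' '
    · subst hx
      rw [if_pos rfl] at ht
      rcases List.mem_cons.mp ht with h1 | h1
      · subst h1; exact Or.inl (by simpa using hct)
      · rcases ih [] h1 with h | h
        · simp at h
        · exact Or.inr (List.mem_cons_of_mem _ h)
    · rw [if_neg hx] at ht
      rcases ih (x :: cur) ht with h | h
      · rcases List.mem_cons.mp h with h1 | h1
        · exact Or.inr (by simp [h1])
        · exact Or.inl h1
      · exact Or.inr (List.mem_cons_of_mem _ h)

theorem sos_no_space (l cur : List Char) (h : ' ' ∉ l) : sosAux l cur = [cur.reverse ++ l] := by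
  induction l generalizing cur with
  | nil => simp [sosAux]
  | cons x rest ih =>
    simp only [List.mem_cons, not_or] at h
    have hx : ¬ x = ' ' := fun hh => h.1 hh.symm
    simp only [sosAux, if_neg hx, ih _ h.2]
    simp

theorem sos_append (t0 rest cur : List Char) (h : ' ' ∉ t0) :
    sosAux (t0 ++ ' ' :: rest) cur = (cur.reverse ++ t0) :: sosAux rest [] := by
  induction t0 generalizing cur with
  | nil => simp [sosAux]
  | cons x t ih =>
    simp only [List.mem_cons, not_or] at h
    have hx : ¬ x = ' ' := fun hh => h.1 hh.symm
    simp only [List.cons_append, sosAux, if_neg hx, ih _ h.2]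
    simp

def lastIdx : List (List Char) → Int → Int → Int
  | [], _, acc => acc
  | t :: rest, i, acc => lastIdx rest (i + 1) (if hasP t then i else acc)

theorem lastIdx_ge (ts : List (List Char)) (i acc : Int) (hi : acc ≤ i) :
    acc ≤ lastIdx ts i acc := by
  induction ts generalizing i acc with
  | nil => simp [lastIdx]
  | cons t rest ih =>
    simp only [lastIdx]
    split_ifs with h
    · calc acc ≤ i := hi
        _ ≤ lastIdx rest (i+1) i := ih (i+1) i (by omega)
    · exact ih (i+1) acc (by omega)

theorem lastIdx_const (ts : List (List Char)) (i acc : Int)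
    (h : ∀ t ∈ ts, hasP t = false) : lastIdx ts i acc = acc := by
  induction ts generalizing i acc with
  | nil => rfl
  | cons t rest ih =>
    simp only [lastIdx, h t (by simp), Bool.false_eq_true, if_false]
    exact ih _ _ (fun t' ht' => h t' (List.mem_cons_of_mem _ ht'))

theorem lastIdx_shift (ts : List (List Char)) (i acc : Int) :
    lastIdx ts (i + 1) (acc + 1) = lastIdx ts i acc + 1 := by
  induction ts generalizing i acc with
  | nil => rfl
  | cons t rest ih =>
    simp only [lastIdx]
    split_ifs with h
    · exact ih (i+1) i
    · exact ih (i+1) acc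

theorem lastIdx_irrel (ts : List (List Char)) (i a a' : Int)
    (h : ∃ t ∈ ts, hasP t = true) : lastIdx ts i a = lastIdx ts i a' := by
  induction ts generalizing i a a' with
  | nil => obtain ⟨t, ht, _⟩ := h; simp at ht
  | cons t rest ih =>
    simp only [lastIdx]
    by_cases hp : hasP t = true
    · simp [hp]
    · obtain ⟨t', ht', hpt'⟩ := h
      have : t' ∈ rest := by
        rcases List.mem_cons.mp ht' with h1 | h1
        · subst h1; exact absurd hpt' hp
        · exact h1
      simp only [hp, Bool.false_eq_true]
      exact ih (i+1) _ _ ⟨t', this, hpt'⟩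

theorem toList_lparen : ("(" : String).toList = ['('] := rfl
theorem toList_rparen : (")" : String).toList = [')'] := rfl

theorem loopA (ct : List (List Char)) (k : Nat) (hk : k ≤ ct.length) (last : Int) :
    (PySem.List.pyRange (k : Int) ((ct.map String.ofList).length : Int)).foldl
      (fun last i =>
        if PySem.Str.isIn "(" (PySem.List.pyGetD (ct.map String.ofList) i "")
            || PySem.Str.isIn ")" (PySem.List.pyGetD (ct.map String.ofList) i "") then i else last) last
    = lastIdx (ct.drop k) (k : Int) last := by
  induction hn : ct.length - k generalizing k last with
  | zero =>
    have hk' : k = ct.length := by omega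
    subst hk'
    rw [PySem.List.pyRange_one_eq_nil (by simp)]
    simp [lastIdx]
  | succ n ih =>
    have hklt : k < ct.length := by omega
    rw [PySem.List.pyRange_one_cons (by simp; omega)]
    rw [List.foldl_cons]
    have hitem : PySem.List.pyGetD (ct.map String.ofList) (k : Int) ""
        = String.ofList ct[k] := by
      rw [PySem.List.pyGetD_natCast]
      rw [List.getD_eq_getElem?_getD, List.getElem?_map,
        List.getElem?_eq_getElem hklt]
      rfl
    have hcond : (PySem.Str.isIn "(" (String.ofList ct[k]) || PySem.Str.isIn ")" (String.ofList ct[k]))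
        = hasP ct[k] := by
      rw [PySem.Str.isIn_eq, PySem.Str.isIn_eq, toList_lparen, toList_rparen,
        String.toList_ofList]
      rfl
    simp only [hitem, hcond]
    have hdrop : ct.drop k = ct[k] :: ct.drop (k + 1) := List.drop_eq_getElem_cons hklt
    rw [hdrop]
    simp only [lastIdx]
    have hcast : ((k : Int) + 1) = ((k + 1 : Nat) : Int) := by push_cast; ring
    rw [hcast, ih (k + 1) (by omega) _ (by omega)]

def Bch (s : List Char) : List Char :=
  let p := max (lci '(' s) (lci ')' s)
  let d := s.drop (p + 1).toNat
  if fsp d = -1 then [] else s.drop (p + 1 + fsp d + 1).toNat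

theorem exists_space_split (s : List Char) (h : ' ' ∈ s) :
    ∃ t0 rest, s = t0 ++ ' ' :: rest ∧ ' ' ∉ t0 := by
  induction s with
  | nil => simp at h
  | cons c tail ih =>
    by_cases hc : c = ' '
    · subst hc; exact ⟨[], tail, rfl, by simp⟩
    · have : ' ' ∈ tail := by
        rcases List.mem_cons.mp h with h1 | h1
        · exact absurd h1.symm hc
        · exact h1
      obtain ⟨t0, rest, hs, ht0⟩ := ih this
      exact ⟨c :: t0, rest, by rw [hs, List.cons_append], by
        simp only [List.mem_cons, not_or]
        exact ⟨fun hh => hc hh.symm, ht0⟩⟩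

theorem drop_len_succ (t0 rest : List Char) :
    (t0 ++ ' ' :: rest).drop (t0.length + 1) = rest := by
  have h : t0 ++ ' ' :: rest = (t0 ++ [' ']) ++ rest := by simp
  rw [h, List.drop_left' (by simp)]

theorem mainCharsAux (n : Nat) : ∀ s : List Char, s.length ≤ n →
    PySem.Chars.join [' '] ((sosAux s []).drop (lastIdx (sosAux s []) 0 0 + 1).toNat) = Bch s := by
  induction n with
  | zero =>
    intro s hs
    have : s = [] := by cases s <;> simp_all
    subst this
    simp [sosAux, lastIdx, hasP, Bch, lci, fsp, PySem.Chars.join_nil]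
  | succ n ih =>
    intro s hs
    by_cases hsp : ' ' ∈ s
    case neg =>
      -- no space: one token, A drops it; B finds no space after the last paren
      have hsos : sosAux s [] = [s] := by simpa using sos_no_space s [] hsp
      have hK : lastIdx (sosAux s []) 0 0 = 0 := by
        rw [hsos]; simp only [lastIdx]; rw [ite_self]
      rw [hK, hsos]
      have hb1 := lci_bounds '(' s
      have hb2 := lci_bounds ')' s
      have hnosp : ' ' ∉ s.drop (max (lci '(' s) (lci ')' s) + 1).toNat :=
        fun hmem => hsp (List.drop_subset _ s hmem)
      simp only [Bch, fsp_no_space _ hnosp, if_pos]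
      norm_num [PySem.Chars.join_nil]
    case pos =>
      obtain ⟨t0, rest, rfl, ht0⟩ := exists_space_split s hsp
      have hrest_len : rest.length ≤ n := by simp at hs; omega
      have hsos : sosAux (t0 ++ ' ' :: rest) [] = t0 :: sosAux rest [] := by
        simpa using sos_append t0 rest [] ht0
      have hlsp : ∀ c : Char, ' ' ≠ c →
          lci c (' ' :: rest) = if 0 ≤ lci c rest then 1 + lci c rest else -1 := by
        intro c hc
        simp [lci, hc]
      have hl1 := lci_append '(' t0 (' ' :: rest)
      have hl2 := lci_append ')' t0 (' ' :: rest)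
      rw [hlsp '(' (by decide)] at hl1
      rw [hlsp ')' (by decide)] at hl2
      have hbt1 := lci_bounds '(' t0
      have hbt2 := lci_bounds ')' t0
      have hbr1 := lci_bounds '(' rest
      have hbr2 := lci_bounds ')' rest
      by_cases hpr : 0 ≤ max (lci '(' rest) (lci ')' rest)
      case neg =>
        -- no parenthesis in rest: the loop keeps index 0, A returns rest;
        -- B's last paren (if any) is inside t0, the next space ends t0
        have hr1 : lci '(' rest = -1 := by omega
        have hr2 : lci ')' rest = -1 := by omega
        have hnp : ∀ t ∈ sosAux rest [], hasP t = false := by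
          intro t ht
          by_contra hcon
          have : hasP t = true := by revert hcon; cases hasP t <;> simp
          rcases (hasP_iff t).mp this with hm | hm
          · rcases mem_of_mem_sosAux '(' rest [] t ht hm with h | h
            · simp at h
            · exact absurd h ((lci_eq_neg_one '(' rest).mp hr1)
          · rcases mem_of_mem_sosAux ')' rest [] t ht hm with h | h
            · simp at h
            · exact absurd h ((lci_eq_neg_one ')' rest).mp hr2)
        have hK : lastIdx (sosAux (t0 ++ ' ' :: rest) []) 0 0 = 0 := by
          rw [hsos]; simp only [lastIdx]; rw [ite_self]
          exact lastIdx_const _ _ _ hnp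
        rw [hK, hsos]
        have hLHS : PySem.Chars.join [' '] ((t0 :: sosAux rest []).drop ((0:Int) + 1).toNat) = rest := by
          norm_num
          have := join_sos rest []
          simpa using this
        rw [hLHS]
        -- B side
        have hp1 : lci '(' (t0 ++ ' ' :: rest) = lci '(' t0 := by rw [hl1]; simp [hr1]
        have hp2 : lci ')' (t0 ++ ' ' :: rest) = lci ')' t0 := by rw [hl2]; simp [hr2]
        simp only [Bch, hp1, hp2]
        set p := max (lci '(' t0) (lci ')' t0) with hp
        have hpb : -1 ≤ p ∧ p < t0.length := by
          constructor
          · exact le_max_of_le_left hbt1.1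
          · exact max_lt hbt1.2 hbt2.2
        have hple : (p + 1).toNat ≤ t0.length := by omega
        have hd : (t0 ++ ' ' :: rest).drop (p + 1).toNat
            = t0.drop (p + 1).toNat ++ ' ' :: rest := List.drop_append_of_le_length hple
        have hnospd : ' ' ∉ t0.drop (p + 1).toNat := fun hm => ht0 (List.drop_subset _ t0 hm)
        rw [hd, fsp_append_space _ _ hnospd]
        have hne : ¬ ((t0.drop (p + 1).toNat).length : Int) = -1 := by omega
        rw [if_neg hne]
        have hlen : (t0.drop (p + 1).toNat).length = t0.length - (p + 1).toNat := by simp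
        rw [hlen]
        have hidx : (p + 1 + ((t0.length - (p + 1).toNat : Nat) : Int) + 1).toNat = t0.length + 1 := by
          omega
        rw [hidx, drop_len_succ]
      case pos =>
        -- a parenthesis occurs in rest: both sides reduce to the same computation on rest
        have hex : ∃ t ∈ sosAux rest [], hasP t = true := by
          rcases le_max_iff.mp hpr with h | h
          · have hm : '(' ∈ rest := by
              by_contra hmm
              have := (lci_eq_neg_one '(' rest).mpr hmm
              omega
            obtain ⟨t, ht, hct⟩ := mem_sosAux '(' (by decide) rest [] (Or.inr hm)
            exact ⟨t, ht, (hasP_iff t).mpr (Or.inl hct)⟩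
          · have hm : ')' ∈ rest := by
              by_contra hmm
              have := (lci_eq_neg_one ')' rest).mpr hmm
              omega
            obtain ⟨t, ht, hct⟩ := mem_sosAux ')' (by decide) rest [] (Or.inr hm)
            exact ⟨t, ht, (hasP_iff t).mpr (Or.inr hct)⟩
        set Kr := lastIdx (sosAux rest []) 0 0 with hKr
        have hKrge : 0 ≤ Kr := lastIdx_ge _ 0 0 le_rfl
        have hK : lastIdx (sosAux (t0 ++ ' ' :: rest) []) 0 0 = Kr + 1 := by
          rw [hsos]; simp only [lastIdx]; rw [ite_self]
          norm_num
          rw [lastIdx_irrel _ 1 0 1 hex]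
          have := lastIdx_shift (sosAux rest []) 0 0
          simpa using this
        rw [hK, hsos]
        have hdropK : (t0 :: sosAux rest []).drop (Kr + 1 + 1).toNat
            = (sosAux rest []).drop (Kr + 1).toNat := by
          have h1 : (Kr + 1 + 1).toNat = (Kr + 1).toNat + 1 := by omega
          rw [h1, List.drop_succ_cons]
        rw [hdropK]
        rw [ih rest hrest_len]
        -- B side: shift the index computation by t0.length + 1
        simp only [Bch]
        set L1 := lci '(' rest with hL1
        set L2 := lci ')' rest with hL2
        have hps : max (lci '(' (t0 ++ ' ' :: rest)) (lci ')' (t0 ++ ' ' :: rest))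
            = (t0.length : Int) + 1 + max L1 L2 := by
          rw [hl1, hl2]
          simp only [max_def]
          split_ifs <;> omega
        rw [hps]
        set pr := max L1 L2 with hprdef
        have hprlt : pr < rest.length := max_lt hbr1.2 hbr2.2
        have hidx1 : ((t0.length : Int) + 1 + pr + 1).toNat = (t0.length + 1) + (pr + 1).toNat := by
          omega
        have hdrop1 : (t0 ++ ' ' :: rest).drop ((t0.length : Int) + 1 + pr + 1).toNat
            = rest.drop (pr + 1).toNat := by
          rw [hidx1, ← List.drop_drop, drop_len_succ]
        rw [hdrop1]
        by_cases hF : fsp (rest.drop (pr + 1).toNat) = -1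
        · rw [if_pos hF, if_pos hF]
        · rw [if_neg hF, if_neg hF]
          have hFb := fsp_bounds (rest.drop (pr + 1).toNat)
          have hidx2 : ((t0.length : Int) + 1 + pr + 1 + fsp (rest.drop (pr + 1).toNat) + 1).toNat
              = (t0.length + 1) + (pr + 1 + fsp (rest.drop (pr + 1).toNat) + 1).toNat := by
            omega
          rw [hidx2, ← List.drop_drop, drop_len_succ]

theorem mainChars (s : List Char) :
    PySem.Chars.join [' '] ((sosAux s []).drop (lastIdx (sosAux s []) 0 0 + 1).toNat) = Bch s :=
  mainCharsAux s.length s le_rfl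

-- ===== VERDICT (by name: the statement is the Claim_ definition above) =====
theorem deal_non_sep_spec : Claim_equal_deal_non_sep := by
  intro string keyword hdom hpre
  unfold Spec_deal_non_sep deal_non_sep deal_non_sep_alt
  rw [hpre]
  simp only [Bool.false_eq_true, if_false]
  by_cases hroot : PySem.Str.isIn "ROOT" string = false
  · rw [if_pos hroot, if_pos hroot]
  · rw [if_neg hroot, if_neg hroot]
    have hsplit : (PySem.Str.split? string " ").getD [] = (sosAux string.toList []).map String.ofList := by
      have h1 : PySem.Chars.split? string.toList [' '] = some (sosAux string.toList []) := by
        unfold PySem.Chars.split?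
        rw [if_neg (by simp), splitOn_space]
      unfold PySem.Str.split?
      rw [show (" " : String).toList = [' '] from rfl, h1]
      rfl
    rw [hsplit]
    have hloop := loopA (sosAux string.toList []) 0 (Nat.zero_le _) 0
    simp only [Nat.cast_zero, List.drop_zero] at hloop
    rw [hloop]
    have hK0 : 0 ≤ lastIdx (sosAux string.toList []) 0 0 := lastIdx_ge _ 0 0 le_rfl
    have hslice : PySem.List.slice ((sosAux string.toList []).map String.ofList)
        (some (lastIdx (sosAux string.toList []) 0 0 + 1)) none
        = ((sosAux string.toList []).drop (lastIdx (sosAux string.toList []) 0 0 + 1).toNat).map String.ofList := by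
      rw [PySem.List.slice_from _ (by omega), List.map_drop]
    rw [hslice]
    have hA : (PySem.Str.join " "
          (((sosAux string.toList []).drop (lastIdx (sosAux string.toList []) 0 0 + 1).toNat).map String.ofList)).toList
        = Bch string.toList := by
      rw [PySem.Str.toList_join, show (" " : String).toList = [' '] from rfl]
      rw [← mainChars string.toList]
      congr 1
      rw [List.map_map]
      simp [Function.comp_def]
    have hrf1 : PySem.Str.rfind string "(" = lci '(' string.toList := by
      rw [PySem.Str.rfind_eq, toList_lparen, rfind_singleton]
    have hrf2 : PySem.Str.rfind string ")" = lci ')' string.toList := by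
      rw [PySem.Str.rfind_eq, toList_rparen, rfind_singleton]
    rw [hrf1, hrf2]
    have hb1 := lci_bounds '(' string.toList
    have hb2 := lci_bounds ')' string.toList
    have hpb : -1 ≤ max (lci '(' string.toList) (lci ')' string.toList)
        ∧ max (lci '(' string.toList) (lci ')' string.toList) < string.toList.length := by
      constructor
      · exact le_max_of_le_left hb1.1
      · exact max_lt hb1.2 hb2.2
    have hcast : max (lci '(' string.toList) (lci ')' string.toList) + 1
        = (((max (lci '(' string.toList) (lci ')' string.toList) + 1).toNat : Nat) : Int) := by omega
    have hff : PySem.Str.findFrom string " " (max (lci '(' string.toList) (lci ')' string.toList) + 1)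
        = (if fsp (string.toList.drop (max (lci '(' string.toList) (lci ')' string.toList) + 1).toNat) = -1
           then -1
           else max (lci '(' string.toList) (lci ')' string.toList) + 1
              + fsp (string.toList.drop (max (lci '(' string.toList) (lci ')' string.toList) + 1).toNat)) := by
      rw [PySem.Str.findFrom_eq, show (" " : String).toList = [' '] from rfl]
      rw [hcast, PySem.Chars.findFrom_natCast _ _ _ (by omega)]
      rw [find_space, ← hcast]
    rw [hff]
    by_cases hF : fsp (string.toList.drop (max (lci '(' string.toList) (lci ')' string.toList) + 1).toNat) = -1
    · rw [if_pos hF]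
      have hBch : Bch string.toList = [] := by
        simp only [Bch]
        rw [if_pos hF]
      have hfin : PySem.Str.join " "
            (((sosAux string.toList []).drop (lastIdx (sosAux string.toList []) 0 0 + 1).toNat).map String.ofList)
          = "" := by
        apply String.toList_inj.mp
        rw [hA, hBch]
        rfl
      rw [hfin]
      simp
    · rw [if_neg hF]
      have hFb := fsp_bounds (string.toList.drop (max (lci '(' string.toList) (lci ')' string.toList) + 1).toNat)
      have hspne : ((max (lci '(' string.toList) (lci ')' string.toList) + 1
            + fsp (string.toList.drop (max (lci '(' string.toList) (lci ')' string.toList) + 1).toNat)) == (-1 : Int)) = false := by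
        rw [beq_eq_false_iff_ne]
        omega
      rw [hspne]
      simp only [Bool.false_eq_true, if_false]
      have hBch : Bch string.toList
          = string.toList.drop (max (lci '(' string.toList) (lci ')' string.toList) + 1
              + fsp (string.toList.drop (max (lci '(' string.toList) (lci ')' string.toList) + 1).toNat) + 1).toNat := by
        simp only [Bch]
        rw [if_neg hF]
      have hfin : PySem.Str.join " "
            (((sosAux string.toList []).drop (lastIdx (sosAux string.toList []) 0 0 + 1).toNat).map String.ofList)
          = PySem.Str.slice string
              (some (max (lci '(' string.toList) (lci ')' string.toList) + 1
                + fsp (string.toList.drop (max (lci '(' string.toList) (lci ')' string.toList) + 1).toNat) + 1)) none := by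
        apply String.toList_inj.mp
        rw [hA, hBch, PySem.Str.toList_slice, PySem.Chars.slice_eq_listSlice,
          PySem.List.slice_from _ (by omega)]
      rw [hfin]
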